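-- pv_equiv track=rewrite | github.com/romeJG/python-backup | ACTIVITIES/Module 4/module4/problem52.py | nearly_equal
-- ===== SOURCE A (Python) =====
-- def nearly_equal(a,b):
--     value_bool = True
--     a = a.lower()
--     b = b.lower()
--     size_a = len(a)
--     size_b = len(b)
--     duplicate_content = []
--     count = 0
--     ctr = 0
--     list_ab = []
--     ab = a+b
--     for x in ab:
--         list_ab.append(x)
--     while ctr < len(list_ab):
--         inr_ctr = ctr + 1
--         while inr_ctr < len(list_ab):
--             if list_ab[ctr] == list_ab[inr_ctr]:
--                 duplicate_content.append(list_ab[ctr])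
--             inr_ctr += 1
--         ctr += 1
--     if size_a == size_b:
--         if size_a - len(duplicate_content) <= 1:
--             value_bool = True
--         else:
--          value_bool = False
--     elif size_a > size_b:
--         if size_a - len(duplicate_content) <= 1:
--             value_bool = True
--         else:
--          value_bool = False
--     else:
--         if size_b - len(duplicate_content) <= 1:
--             value_bool = True
--         else:
--          value_bool = False
--     return value_bool
-- ===== SOURCE B (Python) =====
-- def nearly_equal(a, b):
--     s = (a + b).lower()
--     freq = {}
--     for ch in s:
--         freq[ch] = freq.get(ch, 0) + 1
--     pairs = sum(c * (c - 1) // 2 for c in freq.values())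
--     return max(len(a), len(b)) - pairs <= 1
-- ===== Notes on version B (the rewrite author's own statement) =====
-- stated objective: faster
-- what changed: Replaces A's O(n^2) nested index scan collecting every equal pair of characters with a single-pass frequency dictionary over (a+b).lower() followed by summing c*(c-1)//2 over the counts, and collapses A's three identical branches into max(len(a),len(b)) - pairs <= 1.
import Mathlib
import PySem

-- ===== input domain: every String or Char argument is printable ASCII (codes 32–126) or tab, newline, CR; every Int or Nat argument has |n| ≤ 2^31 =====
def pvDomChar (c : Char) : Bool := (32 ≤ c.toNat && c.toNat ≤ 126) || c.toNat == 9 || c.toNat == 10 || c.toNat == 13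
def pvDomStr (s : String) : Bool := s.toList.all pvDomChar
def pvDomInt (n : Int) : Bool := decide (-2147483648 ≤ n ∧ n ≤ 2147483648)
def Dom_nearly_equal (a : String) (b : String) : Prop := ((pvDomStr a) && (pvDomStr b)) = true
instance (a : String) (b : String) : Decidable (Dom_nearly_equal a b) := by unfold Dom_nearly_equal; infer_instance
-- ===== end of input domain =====

-- B replaces A's O(n^2) nested scan for equal pairs by a one-pass character
-- frequency dictionary and sums c*(c-1)//2 over the counts (faster, asymptotic).

-- ===== PORT A =====
-- inner 'while inr_ctr < len(list_ab)' loop of A (in-range nonneg indexing, so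
-- list_ab[i] is ported as List.getD i ' ' — exact here)
def pvInnerA (l : List Char) (ctr : Nat) (inr : Nat) (dup : List Char) : List Char :=
  if _h : inr < l.length then
    pvInnerA l ctr (inr + 1)
      (if l.getD ctr ' ' == l.getD inr ' ' then dup ++ [l.getD ctr ' '] else dup)
  else dup
termination_by l.length - inr

-- outer 'while ctr < len(list_ab)' loop of A
def pvOuterA (l : List Char) (ctr : Nat) (dup : List Char) : List Char :=
  if _h : ctr < l.length then
    pvOuterA l (ctr + 1) (pvInnerA l ctr (ctr + 1) dup)
  else dup
termination_by l.length - ctr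

def nearly_equal (a : String) (b : String) : Bool :=
  let a' := PySem.Chars.lower a.toList
  let b' := PySem.Chars.lower b.toList
  let size_a : Int := a'.length
  let size_b : Int := b'.length
  let ab := a' ++ b'
  let list_ab := ab.foldl (fun acc x => acc ++ [x]) []
  let duplicate_content := pvOuterA list_ab 0 []
  if size_a == size_b then
    (if size_a - (duplicate_content.length : Int) ≤ 1 then true else false)
  else if size_a > size_b then
    (if size_a - (duplicate_content.length : Int) ≤ 1 then true else false)
  else
    (if size_b - (duplicate_content.length : Int) ≤ 1 then true else false)

-- ===== PORT B =====
def nearly_equal_alt (a : String) (b : String) : Bool :=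
  let s := PySem.Chars.lower (a.toList ++ b.toList)
  let freq := s.foldl (fun d ch => d.insert ch (d.getD ch 0 + 1)) PySem.Dict.empty
  let pairs := freq.values.foldl (fun acc c => acc + PySem.Int.floordiv (c * (c - 1)) 2) 0
  decide (max (a.toList.length : Int) (b.toList.length : Int) - pairs ≤ 1)

-- ===== PRECONDITION & SPEC =====
def Spec_nearly_equal (a : String) (b : String) (out : Bool) : Prop := out = nearly_equal_alt a b
instance (a : String) (b : String) (out : Bool) : Decidable (Spec_nearly_equal a b out) := by unfold Spec_nearly_equal; infer_instance

-- ===== CLAIM (what is proved, stated in full; the proofs are below) =====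
def Claim_equal_nearly_equal : Prop := ∀ (a : String) (b : String), Dom_nearly_equal a b → Spec_nearly_equal a b (nearly_equal a b)

-- ===== LEMMAS AND PROOFS =====

-- number of equal (i < j) pairs in a list, head-recursively
def pvPairs : List Char → Nat
  | [] => 0
  | x :: t => t.count x + pvPairs t

lemma pvInnerA_length (l : List Char) (c : Nat) :
    ∀ n i dup, l.length ≤ i + n →
      (pvInnerA l c i dup).length = dup.length + (l.drop i).count (l.getD c ' ') := by
  intro n
  induction n with
  | zero =>
    intro i dup h
    rw [pvInnerA, dif_neg (by omega), List.drop_eq_nil_of_le (by omega)]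
    simp
  | succ n ih =>
    intro i dup h
    rw [pvInnerA]
    by_cases hi : i < l.length
    · rw [dif_pos hi, ih (i + 1) _ (by omega),
        List.drop_eq_getElem_cons hi, List.count_cons]
      have hgi : l.getD i ' ' = l[i] := List.getD_eq_getElem l ' ' hi
      rw [hgi]
      split_ifs <;> simp_all <;> omega
    · rw [dif_neg hi, List.drop_eq_nil_of_le (by omega)]
      simp

lemma pvOuterA_length (l : List Char) :
    ∀ n c dup, l.length ≤ c + n →
      (pvOuterA l c dup).length = dup.length + pvPairs (l.drop c) := by
  intro n
  induction n with
  | zero =>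
    intro c dup h
    rw [pvOuterA, dif_neg (by omega), List.drop_eq_nil_of_le (by omega)]
    simp [pvPairs]
  | succ n ih =>
    intro c dup h
    rw [pvOuterA]
    by_cases hc : c < l.length
    · rw [dif_pos hc, ih (c + 1) _ (by omega),
        pvInnerA_length l c (l.length) (c + 1) dup (by omega),
        List.drop_eq_getElem_cons hc]
      have hgc : l.getD c ' ' = l[c] := List.getD_eq_getElem l ' ' hc
      rw [hgc]
      simp [pvPairs]
      omega
    · rw [dif_neg hc, List.drop_eq_nil_of_le (by omega)]
      simp [pvPairs]

lemma pvDupLen (l : List Char) : (pvOuterA l 0 []).length = pvPairs l := by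
  simpa using pvOuterA_length l l.length 0 [] (by omega)

lemma pvC2_cast (n : Nat) :
    PySem.Int.floordiv ((n : Int) * ((n : Int) - 1)) 2 = ((n.choose 2 : Nat) : Int) := by
  cases n with
  | zero => decide
  | succ m =>
    have h1 : ((m + 1 : Nat) : Int) * (((m + 1 : Nat) : Int) - 1) = (((m + 1) * m : Nat) : Int) := by
      push_cast; ring
    rw [h1, show (2 : Int) = ((2 : Nat) : Int) from rfl, PySem.Int.floordiv_natCast]
    congr 1
    rw [Nat.choose_two_right]
    simp

lemma pvSumChooseFinset (s : List Char) :
    ∑ k ∈ s.toFinset, (s.count k).choose 2 = pvPairs s := by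
  induction s with
  | nil => simp [pvPairs]
  | cons x t ih =>
    rw [List.toFinset_cons]
    by_cases hx : x ∈ t.toFinset
    · have hT : insert x t.toFinset = t.toFinset := Finset.insert_eq_self.mpr hx
      rw [hT, ← Finset.add_sum_erase _ _ hx]
      rw [← Finset.add_sum_erase _ (fun k => (t.count k).choose 2) hx] at ih
      have he : ∀ k ∈ t.toFinset.erase x, ((x :: t).count k).choose 2 = (t.count k).choose 2 := by
        intro k hk
        have hkx : k ≠ x := Finset.ne_of_mem_erase hk
        simp [hkx.symm]
      rw [Finset.sum_congr rfl he, List.count_cons_self, pvPairs, ← ih]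
      have : (t.count x + 1).choose 2 = t.count x + (t.count x).choose 2 := by
        rw [Nat.choose_succ_succ]
        simp
      omega
    · have hx' : x ∉ t := by simpa using hx
      rw [Finset.sum_insert hx]
      have he : ∀ k ∈ t.toFinset, ((x :: t).count k).choose 2 = (t.count k).choose 2 := by
        intro k hk
        have hkx : k ≠ x := by
          intro hkx; exact hx' (hkx ▸ List.mem_toFinset.mp hk)
        simp [hkx.symm]
      rw [Finset.sum_congr rfl he, ih, List.count_cons_self,
        List.count_eq_zero_of_not_mem hx', pvPairs, List.count_eq_zero_of_not_mem hx']
      simp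

lemma pvSetSum (s : List Char) :
    (((PySem.Set.ofList s).map (fun k => (s.count k).choose 2)).sum : Nat) = pvPairs s := by
  rw [← List.sum_toFinset _ (PySem.Set.nodup_ofList s)]
  have : (PySem.Set.ofList s).toFinset = s.toFinset := by
    ext k
    simp [PySem.Set.mem_ofList]
  rw [this, pvSumChooseFinset]

lemma pvAltPairs (s : List Char) :
    ((PySem.Dict.counter s : PySem.Dict Char Int).values.foldl
        (fun acc c => acc + PySem.Int.floordiv (c * (c - 1)) 2) 0) = ((pvPairs s : Nat) : Int) := by
  rw [PySem.List.foldl_add]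
  have hv : (PySem.Dict.counter s : PySem.Dict Char Int).values
      = (PySem.Set.ofList s).map (fun k => ((s.count k : Nat) : Int)) := by
    simp only [PySem.Dict.values, PySem.Dict.items_counter, List.map_map]
    rfl
  rw [hv, List.map_map]
  have hm : ((PySem.Set.ofList s).map
      ((fun c => PySem.Int.floordiv (c * (c - 1)) 2) ∘ fun k => ((s.count k : Nat) : Int)))
      = (PySem.Set.ofList s).map (fun k => (((s.count k).choose 2 : Nat) : Int)) := by
    apply List.map_congr_left
    intro k _
    exact pvC2_cast (s.count k)
  rw [hm, ← pvSetSum s]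
  push_cast
  simp [Function.comp_def]

lemma pvLowerAppend (x y : List Char) :
    PySem.Chars.lower (x ++ y) = PySem.Chars.lower x ++ PySem.Chars.lower y := by
  simp [PySem.Chars.lower]

-- ===== VERDICT (by name: the statement is the Claim_ definition above) =====
theorem nearly_equal_spec : Claim_equal_nearly_equal := by
  intro a b _
  unfold Spec_nearly_equal nearly_equal nearly_equal_alt
  simp only [PySem.List.foldl_append_singleton_eq_self, List.nil_append]
  rw [PySem.Dict.foldl_insert_getD_add_one_eq_counter, pvAltPairs, pvLowerAppend]
  set L := PySem.Chars.lower a.toList ++ PySem.Chars.lower b.toList with hL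
  rw [pvDupLen L]
  have hla : (PySem.Chars.lower a.toList).length = a.toList.length := by
    simp [PySem.Chars.lower]
  have hlb : (PySem.Chars.lower b.toList).length = b.toList.length := by
    simp [PySem.Chars.lower]
  rw [hla, hlb]
  set p : Int := ((pvPairs L : Nat) : Int)
  set sa : Int := (a.toList.length : Int)
  set sb : Int := (b.toList.length : Int)
  by_cases h1 : sa = sb
  · simp only [h1, beq_self_eq_true, if_true]
    by_cases h2 : sb - p ≤ 1 <;> simp [h2]
  · have : (sa == sb) = false := by simp [h1]
    rw [this]
    simp only [Bool.false_eq_true, if_false]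
    by_cases h3 : sa > sb
    · rw [if_pos h3]
      by_cases h2 : sa - p ≤ 1 <;> simp [h2] <;> omega
    · rw [if_neg h3]
      by_cases h2 : sb - p ≤ 1 <;> simp [h2] <;> omega
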